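-- pv_equiv track=rewrite | github.com/vrthra/FAlgebra | src/FAlgebra.py | keep_exactly_one_fault_at_key
-- ===== SOURCE A (Python) =====
-- from enum import Enum
--
-- def is_nt(symbol):
--      return symbol and (symbol[0], symbol[-1]) == ('<', '>')
--
-- def tsplit(token):
--     assert token[0], token[-1] == ('<', '>')
--     front, *back = token[1:-1].split(None, 1)
--     return front, ' '.join(back)
--
-- def stem(token):
--     return tsplit(token)[0].strip()
--
-- def refinement(token):
--     return tsplit(token)[1]
--
-- def is_refined_key(key):
--     assert is_nt(key)
--     return (' ' in key)
--
-- def is_base_key(key):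
--     return not is_refined_key(key)
--
-- def get_reachable_positions(rule, fkey, reachable):
--     positions = []
--     for i, token in enumerate(rule):
--         if not is_nt(token): continue
--         if fkey in reachable[token]:
--             positions.append(i)
--     return positions
--
-- class FKey(str, Enum):
--     #negate = 'NEGATE'
--     #fault = 'FAULT' # not used
--     atmost = 'ATMOST'
--     atleast = 'ATLEAST'
--     exactly = 'EXACTLY'
--
-- def to_fkey_prefix(name, prefix, kind):
--     #if kind == FKey.negative:
--     #    return "<%s -%s>" % (name[1:-1], prefix)
--     #if kind == FKey.fault: # not used
--     #    return "<%s F%s>" % (name[1:-1], prefix)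
--     if kind == FKey.atmost:
--         return "<%s *F%s>" % (name[1:-1], prefix)
--     elif kind == FKey.atleast:
--         return "<%s +F%s>" % (name[1:-1], prefix)
--     elif kind == FKey.exactly:
--         return "<%s .F%s>" % (name[1:-1], prefix)
--     assert False
--
-- def negate_prefix(prefix):
--     assert ' ' not in prefix
--     return 'neg(%s)' % prefix
--
-- def negate_base_key(k, prefix):
--     assert is_nt(k)
--     assert is_base_key(k)
--     return '<%s %s>' % (stem(k), negate_prefix(prefix))
--
-- def keep_exactly_one_fault_at_key(grammar, key, fsym, prefix, reachable):
--     ref = refinement(to_fkey_prefix(fsym, prefix, FKey.atleast)) # negation should be atleast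
--     rules = grammar[key]
--     my_rules = []
--     for rule in grammar[key]:
--         positions = get_reachable_positions(rule, fsym, reachable)
--         if not positions: # make it len(positions) >= n if necessary
--             # add this rule as is because we can not embed the fault here.
--             # my_rules.append(rule)
--             continue
--         else:
--             # skip pos for each rule
--             for pos in positions:
--                 new_rule = [to_fkey_prefix(t, prefix, FKey.exactly)
--                             if pos == p else  # at p position, there _may be_ a fault, but not in other places
--                             (negate_base_key(t, ref) if is_nt(t) else t)
--                             # change to FKey.exactly to make it exactly
--                             for p,t in enumerate(rule)]
--                 my_rules.append(new_rule)
--     return (to_fkey_prefix(key, prefix, FKey.exactly), my_rules)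
-- ===== SOURCE B (Python) =====
-- from enum import Enum
--
-- def is_nt(symbol):
--      return symbol and (symbol[0], symbol[-1]) == ('<', '>')
--
-- def tsplit(token):
--     assert token[0], token[-1] == ('<', '>')
--     front, *back = token[1:-1].split(None, 1)
--     return front, ' '.join(back)
--
-- def stem(token):
--     return tsplit(token)[0].strip()
--
-- def refinement(token):
--     return tsplit(token)[1]
--
-- def is_refined_key(key):
--     assert is_nt(key)
--     return (' ' in key)
--
-- def is_base_key(key):
--     return not is_refined_key(key)
--
-- class FKey(str, Enum):
--     atmost = 'ATMOST'
--     atleast = 'ATLEAST'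
--     exactly = 'EXACTLY'
--
-- def to_fkey_prefix(name, prefix, kind):
--     if kind == FKey.atmost:
--         return "<%s *F%s>" % (name[1:-1], prefix)
--     elif kind == FKey.atleast:
--         return "<%s +F%s>" % (name[1:-1], prefix)
--     elif kind == FKey.exactly:
--         return "<%s .F%s>" % (name[1:-1], prefix)
--     assert False
--
-- def negate_prefix(prefix):
--     assert ' ' not in prefix
--     return 'neg(%s)' % prefix
--
-- def negate_base_key(k, prefix):
--     assert is_nt(k)
--     assert is_base_key(k)
--     return '<%s %s>' % (stem(k), negate_prefix(prefix))
--
-- def keep_exactly_one_fault_at_key(grammar, key, fsym, prefix, reachable):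
--     # Single forward pass over each rule, with no positions list and no indices:
--     # 'done' holds the partial variants whose fault pivot already lies in the
--     # processed prefix; 'seen' is the raw processed prefix.  At each token the
--     # done-variants are extended with the (negated) token, and each reachable
--     # NT token additionally spawns one fresh variant by negating the whole
--     # prefix and placing the exactly-one-fault pivot on itself.
--     ref = refinement(to_fkey_prefix(fsym, prefix, FKey.atleast))
--     neg = lambda x: negate_base_key(x, ref) if is_nt(x) else x
--     my_rules = []
--     for rule in grammar[key]:
--         done = []
--         seen = []
--         for t in rule:
--             if is_nt(t) and fsym in reachable[t]:
--                 done = [d + [neg(t)] for d in done]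
--                 done.append([neg(x) for x in seen]
--                             + [to_fkey_prefix(t, prefix, FKey.exactly)])
--             else:
--                 done = [d + [neg(t)] for d in done]
--             seen.append(t)
--         my_rules.extend(done)
--     return (to_fkey_prefix(key, prefix, FKey.exactly), my_rules)
-- ===== Notes on version B (the rewrite author's own statement) =====
-- stated objective: alternative
-- what changed: A collects the reachable index positions of each rule and then rebuilds the whole rule once per position with a pivot-vs-negate comprehension; B makes one forward pass per rule with no positions list and no indices, maintaining an accumulator of partial variants ('done') that each token extends, and spawning a new variant (negated prefix + pivot) at each reachable NT token. Pre_ excludes exactly the inputs on which A raises (key missing from grammar, an NT token of a rule missing from reachable, or a negation A actually performs hitting a refined/degenerate NT token or a space-containing ref).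
import Mathlib
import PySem

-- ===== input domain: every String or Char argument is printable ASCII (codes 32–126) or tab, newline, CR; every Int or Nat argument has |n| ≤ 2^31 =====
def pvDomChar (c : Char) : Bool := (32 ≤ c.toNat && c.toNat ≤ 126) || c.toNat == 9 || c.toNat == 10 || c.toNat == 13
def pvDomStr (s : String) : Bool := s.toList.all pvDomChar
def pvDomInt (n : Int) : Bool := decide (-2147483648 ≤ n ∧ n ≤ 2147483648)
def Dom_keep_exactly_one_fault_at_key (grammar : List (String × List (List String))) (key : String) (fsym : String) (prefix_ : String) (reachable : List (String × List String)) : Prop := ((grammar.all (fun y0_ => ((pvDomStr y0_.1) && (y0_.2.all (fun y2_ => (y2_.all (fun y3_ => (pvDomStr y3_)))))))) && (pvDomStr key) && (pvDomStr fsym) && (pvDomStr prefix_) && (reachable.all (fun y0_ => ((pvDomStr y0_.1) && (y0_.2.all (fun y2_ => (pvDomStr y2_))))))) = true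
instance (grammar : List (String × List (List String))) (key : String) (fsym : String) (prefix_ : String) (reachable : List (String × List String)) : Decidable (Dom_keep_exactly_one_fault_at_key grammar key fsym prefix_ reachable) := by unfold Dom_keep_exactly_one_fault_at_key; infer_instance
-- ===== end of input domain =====

-- B replaces A's positions-then-rebuild scheme (collect reachable indices, rebuild the whole rule
-- once per index) by a single forward pass per rule with no indices at all, carrying an accumulator
-- of partial variants (objective: alternative).

-- ===== PORT A =====
-- shared module helpers (used verbatim by both Pythons Source A and Source B)

-- is_nt(symbol)
def pvIsNT (s : String) : Bool :=
  match PySem.Str.pyGet? s 0, PySem.Str.pyGet? s (-1) with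
  | some a, some b => a == '<' && b == '>'
  | _, _ => false

-- token[1:-1]
def pvInner (s : String) : String := PySem.Str.slice s (some 1) (some (-1))

-- tsplit(token); on the [] case Python raises ValueError (excluded by Pre_), we return ("","")
def pvTsplit (token : String) : String × String :=
  match PySem.Str.split₀Max (pvInner token) 1 with
  | [] => ("", "")
  | front :: back => (front, PySem.Str.join " " back)

-- stem(token)
def pvStem (token : String) : String := PySem.Str.strip (pvTsplit token).1

-- refinement(token)
def pvRefinement (token : String) : String := (pvTsplit token).2

inductive PvFKey
  | atmost | atleast | exactly
deriving DecidableEq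

-- to_fkey_prefix(name, prefix, kind)
def pvToFkeyPrefix (name : String) (prefix_ : String) (kind : PvFKey) : String :=
  if kind = PvFKey.atmost then PySem.Str.join "" ["<", pvInner name, " *F", prefix_, ">"]
  else if kind = PvFKey.atleast then PySem.Str.join "" ["<", pvInner name, " +F", prefix_, ">"]
  else if kind = PvFKey.exactly then PySem.Str.join "" ["<", pvInner name, " .F", prefix_, ">"]
  else name  -- 'assert False': unreachable

-- negate_prefix(prefix) (its assert raises outside Pre_)
def pvNegatePrefix (p : String) : String := PySem.Str.join "" ["neg(", p, ")"]

-- negate_base_key(k, prefix) (its asserts raise outside Pre_)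
def pvNegateBaseKey (k : String) (prefix_ : String) : String :=
  PySem.Str.join "" ["<", pvStem k, " ", pvNegatePrefix prefix_, ">"]

-- get_reachable_positions(rule, fkey, reachable); reachable[token] is a KeyError outside Pre_
def pvGetReachablePositions (rule : List String) (fkey : String) (reachable : List (String × List String)) : List Int :=
  (PySem.List.enumerate rule 0).foldl (fun positions it =>
    if !pvIsNT it.2 then positions
    else if (PySem.Dict.getD (PySem.Dict.mk reachable) it.2 []).contains fkey then positions ++ [it.1]
    else positions) []

def keep_exactly_one_fault_at_key (grammar : List (String × List (List String))) (key : String) (fsym : String) (prefix_ : String) (reachable : List (String × List String)) : String × List (List String) :=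
  let ref := pvRefinement (pvToFkeyPrefix fsym prefix_ PvFKey.atleast)
  -- grammar[key] (KeyError outside Pre_); Python binds it to a dead variable and re-reads it in the loop
  let rules := PySem.Dict.getD (PySem.Dict.mk grammar) key []
  let my_rules := rules.foldl (fun my_rules rule =>
    let positions := pvGetReachablePositions rule fsym reachable
    if positions.isEmpty then my_rules
    else positions.foldl (fun acc pos =>
      acc ++ [(PySem.List.enumerate rule 0).map (fun pt =>
        if pos = pt.1 then pvToFkeyPrefix pt.2 prefix_ PvFKey.exactly
        else if pvIsNT pt.2 then pvNegateBaseKey pt.2 ref else pt.2)]) my_rules) []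
  (pvToFkeyPrefix key prefix_ PvFKey.exactly, my_rules)

-- ===== PORT B =====
-- single forward pass per rule: st.1 = 'done' (variants whose pivot lies in the processed
-- prefix), st.2 = 'seen' (the raw processed prefix); no positions list, no indices
def keep_exactly_one_fault_at_key_alt (grammar : List (String × List (List String))) (key : String) (fsym : String) (prefix_ : String) (reachable : List (String × List String)) : String × List (List String) :=
  let ref := pvRefinement (pvToFkeyPrefix fsym prefix_ PvFKey.atleast)
  let neg := fun x => if pvIsNT x then pvNegateBaseKey x ref else x
  let my_rules := (PySem.Dict.getD (PySem.Dict.mk grammar) key []).foldl (fun my_rules rule =>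
    let st := rule.foldl (fun (st : List (List String) × List String) t =>
      if pvIsNT t && (PySem.Dict.getD (PySem.Dict.mk reachable) t []).contains fsym then
        (st.1.map (fun d => d ++ [neg t]) ++
           [st.2.map neg ++ [pvToFkeyPrefix t prefix_ PvFKey.exactly]],
         st.2 ++ [t])
      else
        (st.1.map (fun d => d ++ [neg t]), st.2 ++ [t])) ([], [])
    my_rules ++ st.1) []
  (pvToFkeyPrefix key prefix_ PvFKey.exactly, my_rules)

-- ===== PRECONDITION & SPEC =====
-- Pre_ holds exactly where the Python A returns normally: key must be a key of grammar, every NT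
-- token of grammar[key]'s rules must be a key of reachable (else KeyError), and every NT token that
-- A actually negates (i.e. that has a reachable pivot at ANOTHER index of its rule) must be
-- negatable: ref without space, token without space, token's inner part non-degenerate (else
-- AssertionError/ValueError inside negate_base_key).
def Pre_keep_exactly_one_fault_at_key (grammar : List (String × List (List String))) (key : String) (fsym : String) (prefix_ : String) (reachable : List (String × List String)) : Prop :=
  (match PySem.Dict.get? (PySem.Dict.mk grammar) key with
   | none => false
   | some rules =>
     let ref := pvRefinement (pvToFkeyPrefix fsym prefix_ PvFKey.atleast)
     let piv := fun t => pvIsNT t && (PySem.Dict.getD (PySem.Dict.mk reachable) t []).contains fsym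
     let negOK := fun t => !PySem.Str.isIn " " ref && !PySem.Str.isIn " " t &&
                           !(PySem.Str.split₀Max (pvInner t) 1).isEmpty
     rules.all (fun rule =>
       rule.all (fun t => !pvIsNT t || PySem.Dict.contains (PySem.Dict.mk reachable) t) &&
       (let c := (rule.filter piv).length
        rule.all (fun t => !pvIsNT t ||
          (if piv t then c ≤ 1 else c = 0) || negOK t)))) = true
instance (grammar : List (String × List (List String))) (key : String) (fsym : String) (prefix_ : String) (reachable : List (String × List String)) : Decidable (Pre_keep_exactly_one_fault_at_key grammar key fsym prefix_ reachable) := by unfold Pre_keep_exactly_one_fault_at_key; infer_instance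

def pvWitness_keep_exactly_one_fault_at_key : (List (String × List (List String))) × String × String × String × (List (String × List String)) :=
  ([("<k>", [["<a>", "x"]])], "<k>", "<f>", "p", [("<a>", ["<f>"])])

def Spec_keep_exactly_one_fault_at_key (grammar : List (String × List (List String))) (key : String) (fsym : String) (prefix_ : String) (reachable : List (String × List String)) (out : String × List (List String)) : Prop := out = keep_exactly_one_fault_at_key_alt grammar key fsym prefix_ reachable
instance (grammar : List (String × List (List String))) (key : String) (fsym : String) (prefix_ : String) (reachable : List (String × List String)) (out : String × List (List String)) : Decidable (Spec_keep_exactly_one_fault_at_key grammar key fsym prefix_ reachable out) := by unfold Spec_keep_exactly_one_fault_at_key; infer_instance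

-- ===== CLAIM (what is proved, stated in full; the proofs are below) =====
def Claim_equal_keep_exactly_one_fault_at_key : Prop := ∀ (grammar : List (String × List (List String))) (key : String) (fsym : String) (prefix_ : String) (reachable : List (String × List String)), Dom_keep_exactly_one_fault_at_key grammar key fsym prefix_ reachable → Pre_keep_exactly_one_fault_at_key grammar key fsym prefix_ reachable → Spec_keep_exactly_one_fault_at_key grammar key fsym prefix_ reachable (keep_exactly_one_fault_at_key grammar key fsym prefix_ reachable)

-- ===== LEMMAS AND PROOFS =====

theorem pvWitness_ok :
    Dom_keep_exactly_one_fault_at_key (pvWitness_keep_exactly_one_fault_at_key.1) (pvWitness_keep_exactly_one_fault_at_key.2.1) (pvWitness_keep_exactly_one_fault_at_key.2.2.1) (pvWitness_keep_exactly_one_fault_at_key.2.2.2.1) (pvWitness_keep_exactly_one_fault_at_key.2.2.2.2) ∧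
    Pre_keep_exactly_one_fault_at_key (pvWitness_keep_exactly_one_fault_at_key.1) (pvWitness_keep_exactly_one_fault_at_key.2.1) (pvWitness_keep_exactly_one_fault_at_key.2.2.1) (pvWitness_keep_exactly_one_fault_at_key.2.2.2.1) (pvWitness_keep_exactly_one_fault_at_key.2.2.2.2) := by
  decide

-- A's positions list is the filtered enumeration
theorem positions_eq_filter (rule : List String) (fkey : String)
    (reachable : List (String × List String)) :
    pvGetReachablePositions rule fkey reachable
    = ((PySem.List.enumerate rule 0).filter
        (fun it => pvIsNT it.2 && (PySem.Dict.getD (PySem.Dict.mk reachable) it.2 []).contains fkey)).map (·.1) := by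
  unfold pvGetReachablePositions
  have hstep : (fun (positions : List Int) (it : Int × String) =>
        if (!pvIsNT it.2) = true then positions
        else if (PySem.Dict.getD (PySem.Dict.mk reachable) it.2 []).contains fkey = true
             then positions ++ [it.1] else positions)
      = (fun (positions : List Int) (it : Int × String) =>
        if (pvIsNT it.2 && (PySem.Dict.getD (PySem.Dict.mk reachable) it.2 []).contains fkey) = true
        then positions ++ [(fun (it : Int × String) => it.1) it] else positions) := by
    funext positions it
    by_cases hnt : pvIsNT it.2 = true <;> simp [hnt]
  rw [hstep, PySem.List.foldl_append_if]
  simp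

-- A's per-position comprehension is the negated rule patched at the pivot index
theorem enum_map_eq_set (rule : List String) (f g : String → String) (k : Nat)
    (hk : k < rule.length) :
    (PySem.List.enumerate rule 0).map (fun pt => if (k : Int) = pt.1 then g pt.2 else f pt.2)
    = (rule.map f).set k (g rule[k]) := by
  apply List.ext_getElem
  · simp [PySem.List.length_enumerate]
  · intro i hi₁ hi₂
    have hi : i < rule.length := by simpa [PySem.List.length_enumerate] using hi₁
    rw [List.getElem_map, PySem.List.getElem_enumerate, List.getElem_set]
    by_cases hik : i = k
    · subst hik; simp
    · have hne : ¬ ((k : Int) = 0 + (i : Int)) := by omega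
      simp [Ne.symm hik]

-- B's per-rule forward pass, fully characterised: starting from (done, pre), the final 'done'
-- is the old variants each extended with the negated suffix, followed by one variant per pivot
-- of the suffix — the whole rule negated and patched at that pivot's index.
theorem loop_spec (piv : String → Bool) (neg ex : String → String) :
    ∀ (post : List String) (done : List (List String)) (pre : List String),
    (post.foldl (fun (st : List (List String) × List String) t =>
        if piv t then
          (st.1.map (fun d => d ++ [neg t]) ++ [st.2.map neg ++ [ex t]], st.2 ++ [t])
        else
          (st.1.map (fun d => d ++ [neg t]), st.2 ++ [t])) (done, pre)).1
    = done.map (fun d => d ++ post.map neg) ++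
      ((PySem.List.enumerate post (pre.length : Int)).filter (fun it => piv it.2)).map
        (fun it => ((pre ++ post).map neg).set it.1.toNat (ex it.2)) := by
  intro post
  induction post with
  | nil => intro done pre; simp [PySem.List.enumerate_nil]
  | cons t rest ih =>
    intro done pre
    simp only [List.foldl_cons]
    by_cases hp : piv t = true
    · rw [if_pos hp,
        ih (done.map (fun d => d ++ [neg t]) ++ [pre.map neg ++ [ex t]]) (pre ++ [t])]
      simp [hp, PySem.List.enumerate_cons, Function.comp, List.append_assoc]
    · rw [if_neg hp, ih (done.map (fun d => d ++ [neg t])) (pre ++ [t])]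
      simp [hp, PySem.List.enumerate_cons, Function.comp, List.append_assoc]

-- the two per-rule computations coincide
theorem rule_agree (rule : List String) (fsym prefix_ ref : String)
    (reachable : List (String × List String)) :
    (if (pvGetReachablePositions rule fsym reachable).isEmpty then ([] : List (List String))
     else (pvGetReachablePositions rule fsym reachable).foldl (fun acc pos =>
       acc ++ [(PySem.List.enumerate rule 0).map (fun pt =>
         if pos = pt.1 then pvToFkeyPrefix pt.2 prefix_ PvFKey.exactly
         else if pvIsNT pt.2 then pvNegateBaseKey pt.2 ref else pt.2)]) [])
    = (rule.foldl (fun (st : List (List String) × List String) t =>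
        if pvIsNT t && (PySem.Dict.getD (PySem.Dict.mk reachable) t []).contains fsym then
          (st.1.map (fun d => d ++ [if pvIsNT t then pvNegateBaseKey t ref else t]) ++
             [st.2.map (fun x => if pvIsNT x then pvNegateBaseKey x ref else x) ++
              [pvToFkeyPrefix t prefix_ PvFKey.exactly]],
           st.2 ++ [t])
        else
          (st.1.map (fun d => d ++ [if pvIsNT t then pvNegateBaseKey t ref else t]), st.2 ++ [t]))
        (([] : List (List String)), ([] : List String))).1 := by
  rw [loop_spec (fun t => pvIsNT t && (PySem.Dict.getD (PySem.Dict.mk reachable) t []).contains fsym)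
      (fun x => if pvIsNT x then pvNegateBaseKey x ref else x)
      (fun t => pvToFkeyPrefix t prefix_ PvFKey.exactly) rule [] []]
  simp only [List.map_nil, List.nil_append, List.length_nil, Nat.cast_zero]
  by_cases hemp : (pvGetReachablePositions rule fsym reachable).isEmpty
  · rw [if_pos hemp]
    rw [positions_eq_filter] at hemp
    simp only [List.isEmpty_iff, List.map_eq_nil_iff] at hemp
    rw [hemp]
    simp
  · rw [if_neg hemp]
    rw [PySem.List.foldl_append_singleton_eq_map, List.nil_append, positions_eq_filter,
      List.map_map]
    apply List.map_congr_left
    intro it hit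
    have hmem : it ∈ PySem.List.enumerate rule 0 := List.mem_of_mem_filter hit
    rw [PySem.List.mem_enumerate_iff] at hmem
    obtain ⟨k, hk, rfl⟩ := hmem
    simp only [Function.comp]
    rw [show ((0 : Int) + (k : Nat)) = ((k : Nat) : Int) by simp]
    rw [enum_map_eq_set rule (fun x => if pvIsNT x = true then pvNegateBaseKey x ref else x)
      (fun t => pvToFkeyPrefix t prefix_ PvFKey.exactly) k hk]
    simp

theorem ports_agree (grammar : List (String × List (List String))) (key : String)
    (fsym : String) (prefix_ : String) (reachable : List (String × List String)) :
    keep_exactly_one_fault_at_key grammar key fsym prefix_ reachable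
    = keep_exactly_one_fault_at_key_alt grammar key fsym prefix_ reachable := by
  unfold keep_exactly_one_fault_at_key keep_exactly_one_fault_at_key_alt
  refine congrArg _ ?_
  apply PySem.List.foldl_congr_mem'
  intro rule _ acc
  dsimp only
  rw [← rule_agree rule fsym prefix_ (pvRefinement (pvToFkeyPrefix fsym prefix_ PvFKey.atleast)) reachable]
  by_cases hemp : (pvGetReachablePositions rule fsym reachable).isEmpty
  · rw [if_pos hemp, if_pos hemp]
    simp
  · rw [if_neg hemp, if_neg hemp, PySem.List.foldl_append_singleton_eq_map,
      PySem.List.foldl_append_singleton_eq_map]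
    simp

-- ===== VERDICT (by name: the statement is the Claim_ definition above) =====
theorem keep_exactly_one_fault_at_key_spec : Claim_equal_keep_exactly_one_fault_at_key := by
  intro grammar key fsym prefix_ reachable _ _
  exact ports_agree grammar key fsym prefix_ reachable
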